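-- pv_equiv track=rewrite | github.com/909ma/Repository-for-Study | 프로그래머스/Python_안전지대.py | solution
-- ===== SOURCE A (Python) =====
-- def solution(board):
--     answer = 0
--     n, m = len(board), len(board[0])
--
--     check_list = [[0] * (m + 2) for _ in range(n + 2)]
--
--     for i in range(n):
--         for j in range(m):
--             check_list[i + 1][j + 1] = board[i][j]
--
--     for i in range(1, n + 1):
--         for j in range(1, m + 1):
--             temp = (
--                 check_list[i][j] + check_list[i - 1][j - 1]
--                 + check_list[i][j - 1] + check_list[i + 1][j - 1]
--                 + check_list[i - 1][j] + check_list[i + 1][j]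
--                 + check_list[i - 1][j + 1] + check_list[i][j + 1]
--                 + check_list[i + 1][j + 1]
--             )
--             if temp == 0:
--                 answer += 1
--     return answer
-- ===== SOURCE B (Python) =====
-- def solution(board):
--     n, m = len(board), len(board[0])
--     # horizontal stage: H[i][j] = row i summed over columns j-1..j+1 (outside -> 0)
--     H = [[(row[j - 1] if j > 0 else 0) + row[j] + (row[j + 1] if j + 1 < m else 0)
--           for j in range(m)] for row in board]
--     # vertical stage: 3x3 sum at (i,j) = H[i-1][j] + H[i][j] + H[i+1][j]
--     return sum(
--         1
--         for i in range(n)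
--         for j in range(m)
--         if (H[i - 1][j] if i > 0 else 0) + H[i][j] + (H[i + 1][j] if i + 1 < n else 0) == 0
--     )
-- ===== Notes on version B (the rewrite author's own statement) =====
-- stated objective: alternative
-- what changed: B replaces A's zero-padded (n+2)x(m+2) scratch grid and per-cell nine-term sum by a separable two-stage scheme: a horizontal 3-window pass per row, then a vertical 3-row sum, counting zero windows with a comprehension.
import Mathlib
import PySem

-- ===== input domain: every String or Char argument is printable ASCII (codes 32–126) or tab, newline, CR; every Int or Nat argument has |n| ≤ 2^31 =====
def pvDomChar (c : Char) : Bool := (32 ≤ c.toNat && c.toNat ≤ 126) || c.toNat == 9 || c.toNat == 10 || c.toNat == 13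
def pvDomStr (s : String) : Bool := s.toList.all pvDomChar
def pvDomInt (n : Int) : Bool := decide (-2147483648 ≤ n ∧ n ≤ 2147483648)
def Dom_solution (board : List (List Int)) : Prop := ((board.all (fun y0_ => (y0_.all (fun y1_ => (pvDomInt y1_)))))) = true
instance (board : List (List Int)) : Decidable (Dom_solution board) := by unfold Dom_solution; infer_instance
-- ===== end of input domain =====

-- B replaces A's zero-padded (n+2)x(m+2) scratch grid and per-cell nine-term sum by a
-- separable two-stage scheme (horizontal 3-window pass per row, then a vertical 3-row sum,
-- counting zero windows with filters); objective: alternative algorithm, same O(n*m) cost.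

-- ===== PORT A =====
-- check_list[i+1][j+1] = board[i][j]  (one assignment of the Python loop body)
def pvAStep (board : List (List Int)) (i : Nat) (cl : List (List Int)) (j : Nat) : List (List Int) :=
  cl.modify (i + 1) (fun row => row.set (j + 1) ((board.getD i []).getD j 0))

-- check_list after the two filling loops (zero grid of (n+2) x (m+2), then the writes)
def pvAGrid (board : List (List Int)) : List (List Int) :=
  (List.range board.length).foldl
    (fun cl i => (List.range (board.getD 0 []).length).foldl (pvAStep board i) cl)
    ((List.range (board.length + 2)).map (fun _ => List.replicate ((board.getD 0 []).length + 2) (0 : Int)))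

def pvARead (board : List (List Int)) (a b : Nat) : Int :=
  ((pvAGrid board).getD a []).getD b 0

-- the nine-term variable `temp` of A's counting loop; Python's i,j ∈ range(1, n+1) are
-- iterated here as i,j ∈ range n with padded index i+1, so the reads are exactly A's nine
def pvATemp (board : List (List Int)) (i j : Nat) : Int :=
  pvARead board (i+1) (j+1) + pvARead board i j
  + pvARead board (i+1) j + pvARead board (i+2) j
  + pvARead board i (j+1) + pvARead board (i+2) (j+1)
  + pvARead board i (j+2) + pvARead board (i+1) (j+2)
  + pvARead board (i+2) (j+2)

def solution (board : List (List Int)) : Int :=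
  (List.range board.length).foldl (fun ans i =>
    (List.range (board.getD 0 []).length).foldl (fun ans j =>
      if pvATemp board i j = 0 then ans + 1 else ans) ans) 0

-- ===== PORT B =====
-- one row of Source B's horizontal stage: H-row[j] = row[j-1..j+1] with out-of-range -> 0
def pvHRow (m : Nat) (row : List Int) : List Int :=
  (List.range m).map (fun j =>
    (if 0 < j then row.getD (j-1) 0 else 0) + row.getD j 0
      + (if j+1 < m then row.getD (j+1) 0 else 0))

-- Source B's comprehension condition: vertical 3-row sum of H at (i,j) equals 0
def pvBCond (H : List (List Int)) (n : Nat) (i j : Nat) : Bool :=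
  decide ((if 0 < i then (H.getD (i-1) []).getD j 0 else 0)
    + (H.getD i []).getD j 0
    + (if i+1 < n then (H.getD (i+1) []).getD j 0 else 0) = (0 : Int))

def solution_alt (board : List (List Int)) : Int :=
  let n := board.length
  let m := (board.getD 0 []).length
  let H := board.map (pvHRow m)
  ((((List.range n).map (fun i =>
    ((List.range m).filter (pvBCond H n i)).length)).sum : Nat) : Int)

-- ===== PRECONDITION & SPEC =====
-- Pre_ excludes exactly the inputs where the Python A raises IndexError: the empty board
-- (board[0]) and boards with a row shorter than the first row (board[i][j], j < len(board[0])).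
def Pre_solution (board : List (List Int)) : Prop :=
  board ≠ [] ∧ ∀ row ∈ board, (board.getD 0 []).length ≤ row.length
instance (board : List (List Int)) : Decidable (Pre_solution board) := by unfold Pre_solution; infer_instance
def pvWitness_solution : List (List Int) := [[0, 1], [0, 0]]

def Spec_solution (board : List (List Int)) (out : Int) : Prop := out = solution_alt board
instance (board : List (List Int)) (out : Int) : Decidable (Spec_solution board out) := by unfold Spec_solution; infer_instance

-- ===== CLAIM (what is proved, stated in full; the proofs are below) =====
def Claim_equal_solution : Prop := ∀ (board : List (List Int)), Dom_solution board → Pre_solution board → Spec_solution board (solution board)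

-- ===== LEMMAS AND PROOFS =====

-- board[a][b] seen through total getD (exact on in-range reads)
def pvCell (board : List (List Int)) (a b : Nat) : Int := (board.getD a []).getD b 0

-- the horizontal 3-window of row a at column j, written over board cells
def pvTriple (board : List (List Int)) (a j : Nat) : Int :=
  (if 0 < j then pvCell board a (j-1) else 0) + pvCell board a j
    + (if j+1 < (board.getD 0 []).length then pvCell board a (j+1) else 0)

-- a rectangular grid shape, stated through getD so reads stay total
def pvShape (cl : List (List Int)) (R C : Nat) : Prop :=
  cl.length = R ∧ ∀ a, a < R → (cl.getD a []).length = C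

theorem pvFoldlRangeSucc {α : Type} (f : α → Nat → α) (init : α) (k : Nat) :
    (List.range (k+1)).foldl f init = f ((List.range k).foldl f init) k := by
  rw [List.range_succ, List.foldl_append, List.foldl_cons, List.foldl_nil]

theorem pvRead_mod_set (cl : List (List Int)) (i j : Nat) (x : Int) (a b : Nat)
    (hi : i < cl.length) (hj : j < (cl.getD i []).length) :
    (((cl.modify i (fun r => r.set j x)).getD a []).getD b 0)
      = if a = i ∧ b = j then x else ((cl.getD a []).getD b 0) := by
  simp only [List.getD_eq_getElem?_getD, List.getElem?_modify]
  by_cases hai : a = i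
  · subst hai
    obtain ⟨row, hrow⟩ : ∃ row, cl[a]? = some row :=
      Option.isSome_iff_exists.mp (by simp [hi])
    have hjlen : j < row.length := by simpa [List.getD_eq_getElem?_getD, hrow] using hj
    simp only [hrow, Functor.map, Option.map_some, Option.getD_some,
      List.getElem?_set, if_true]
    by_cases hbj : b = j
    · subst hbj; simp [hjlen]
    · simp [Ne.symm hbj, hbj]
  · simp [hai, Ne.symm hai]

theorem pvShape_mod_set (cl : List (List Int)) (i j : Nat) (x : Int) (R C : Nat)
    (h : pvShape cl R C) : pvShape (cl.modify i (fun r => r.set j x)) R C := by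
  obtain ⟨hlen, hrows⟩ := h
  refine ⟨by simpa using hlen, ?_⟩
  intro a ha
  simp only [List.getD_eq_getElem?_getD, List.getElem?_modify]
  by_cases hai : a = i
  · subst hai
    obtain ⟨row, hrow⟩ : ∃ row, cl[a]? = some row :=
      Option.isSome_iff_exists.mp (by simp [hlen ▸ ha])
    have := hrows a ha
    simp only [List.getD_eq_getElem?_getD, hrow, Option.getD_some] at this
    simp [hrow, this]
  · simpa [hai, Ne.symm hai, List.getD_eq_getElem?_getD] using hrows a ha

theorem pvZeroGrid_read (R C a b : Nat) :
    ((((List.range R).map (fun _ => List.replicate C (0 : Int))).getD a []).getD b 0) = 0 := by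
  simp only [List.getD_eq_getElem?_getD, List.getElem?_map]
  by_cases ha : a < R <;> simp [ha]

theorem pvZeroGrid_shape (R C : Nat) :
    pvShape ((List.range R).map (fun _ => List.replicate C (0 : Int))) R C := by
  refine ⟨by simp, ?_⟩
  intro a ha
  simp [List.getD_eq_getElem?_getD, ha]

-- === A-side characterization: the padded grid's entries ===
theorem pvA_inner (board : List (List Int)) (i : Nat) (cl : List (List Int))
    (hsh : pvShape cl (board.length + 2) ((board.getD 0 []).length + 2))
    (hi : i < board.length) (k : Nat) (hk : k ≤ (board.getD 0 []).length) :
    pvShape ((List.range k).foldl (pvAStep board i) cl) (board.length + 2) ((board.getD 0 []).length + 2)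
    ∧ ∀ a b, ((((List.range k).foldl (pvAStep board i) cl).getD a []).getD b 0)
        = if a = i + 1 ∧ 1 ≤ b ∧ b ≤ k then pvCell board i (b - 1) else ((cl.getD a []).getD b 0) := by
  induction k with
  | zero =>
    refine ⟨by simpa using hsh, ?_⟩
    intro a b
    simp only [List.range_zero, List.foldl_nil]
    split_ifs with h
    · omega
    · rfl
  | succ k ih =>
    have hk' : k ≤ (board.getD 0 []).length := by omega
    obtain ⟨ihsh, ihread⟩ := ih hk'
    rw [List.range_succ, List.foldl_append, List.foldl_cons, List.foldl_nil]
    have hlen : i + 1 < ((List.range k).foldl (pvAStep board i) cl).length := by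
      rw [ihsh.1]; omega
    have hrow : k + 1 < (((List.range k).foldl (pvAStep board i) cl).getD (i+1) []).length := by
      rw [ihsh.2 (i+1) (by omega)]; omega
    refine ⟨pvShape_mod_set _ _ _ _ _ _ ihsh, ?_⟩
    intro a b
    rw [pvAStep, pvRead_mod_set _ _ _ _ _ _ hlen hrow, ihread a b]
    by_cases h1 : a = i + 1 ∧ b = k + 1
    · simp only [if_pos h1, if_pos (show a = i + 1 ∧ 1 ≤ b ∧ b ≤ k + 1 by omega)]
      have : b - 1 = k := by omega
      rw [this]; rfl
    · rw [if_neg h1]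
      split_ifs with h2 h3 h3
      · rfl
      · omega
      · omega
      · rfl

theorem pvA_outer (board : List (List Int)) (k : Nat) (hk : k ≤ board.length) :
    pvShape ((List.range k).foldl
        (fun cl i => (List.range (board.getD 0 []).length).foldl (pvAStep board i) cl)
        ((List.range (board.length + 2)).map (fun _ => List.replicate ((board.getD 0 []).length + 2) (0 : Int))))
      (board.length + 2) ((board.getD 0 []).length + 2)
    ∧ ∀ a b, ((((List.range k).foldl
        (fun cl i => (List.range (board.getD 0 []).length).foldl (pvAStep board i) cl)
        ((List.range (board.length + 2)).map (fun _ => List.replicate ((board.getD 0 []).length + 2) (0 : Int)))).getD a []).getD b 0)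
        = if 1 ≤ a ∧ a ≤ k ∧ 1 ≤ b ∧ b ≤ (board.getD 0 []).length
          then pvCell board (a - 1) (b - 1) else 0 := by
  induction k with
  | zero =>
    refine ⟨pvZeroGrid_shape _ _, ?_⟩
    intro a b
    simp only [List.range_zero, List.foldl_nil]
    rw [pvZeroGrid_read]
    split_ifs with h
    · omega
    · rfl
  | succ k ih =>
    obtain ⟨ihsh, ihread⟩ := ih (by omega)
    rw [pvFoldlRangeSucc]
    obtain ⟨sh', read'⟩ := pvA_inner board k _ ihsh (by omega) (board.getD 0 []).length le_rfl
    refine ⟨sh', ?_⟩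
    intro a b
    rw [read' a b, ihread a b]
    by_cases h1 : a = k + 1 ∧ 1 ≤ b ∧ b ≤ (board.getD 0 []).length
    · rw [if_pos h1, if_pos (by omega)]
      have : a - 1 = k := by omega
      rw [this]
    · rw [if_neg h1]
      split_ifs with h2 h3 h3
      · rfl
      · omega
      · omega
      · rfl

theorem pvARead_eq (board : List (List Int)) (a b : Nat) :
    pvARead board a b
      = if 1 ≤ a ∧ a ≤ board.length ∧ 1 ≤ b ∧ b ≤ (board.getD 0 []).length
        then pvCell board (a - 1) (b - 1) else 0 := by
  exact (pvA_outer board board.length le_rfl).2 a b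

theorem pvSub1 (t : Nat) : t + 1 - 1 = t := by omega
theorem pvSub2 (t : Nat) : t + 2 - 1 = t + 1 := by omega

-- A's nine-term temp regrouped as three horizontal windows (given i<n, j<m)
theorem pvTemp_eq (board : List (List Int)) (i j : Nat)
    (hi : i < board.length) (hj : j < (board.getD 0 []).length) :
    pvATemp board i j
      = (if 0 < i then pvTriple board (i-1) j else 0) + pvTriple board i j
        + (if i+1 < board.length then pvTriple board (i+1) j else 0) := by
  have p11 : pvARead board (i+1) (j+1) = pvCell board i j := by
    rw [pvARead_eq, if_pos (by omega), pvSub1, pvSub1]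
  have p00 : pvARead board i j
      = if 0 < i then (if 0 < j then pvCell board (i-1) (j-1) else 0) else 0 := by
    rw [pvARead_eq]; split_ifs <;> first | rfl | (exfalso; omega)
  have p10 : pvARead board (i+1) j = if 0 < j then pvCell board i (j-1) else 0 := by
    rw [pvARead_eq]; simp only [pvSub1]; split_ifs <;> first | rfl | (exfalso; omega)
  have p20 : pvARead board (i+2) j
      = if i+1 < board.length then (if 0 < j then pvCell board (i+1) (j-1) else 0) else 0 := by
    rw [pvARead_eq]; simp only [pvSub2]; split_ifs <;> first | rfl | (exfalso; omega)
  have p01 : pvARead board i (j+1) = if 0 < i then pvCell board (i-1) j else 0 := by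
    rw [pvARead_eq]; simp only [pvSub1]; split_ifs <;> first | rfl | (exfalso; omega)
  have p21 : pvARead board (i+2) (j+1)
      = if i+1 < board.length then pvCell board (i+1) j else 0 := by
    rw [pvARead_eq]; simp only [pvSub1]; split_ifs <;> first | rfl | (exfalso; omega)
  have p02 : pvARead board i (j+2)
      = if 0 < i then (if j+1 < (board.getD 0 []).length then pvCell board (i-1) (j+1) else 0) else 0 := by
    rw [pvARead_eq]; simp only [pvSub2]; split_ifs <;> first | rfl | (exfalso; omega)
  have p12 : pvARead board (i+1) (j+2)
      = if j+1 < (board.getD 0 []).length then pvCell board i (j+1) else 0 := by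
    rw [pvARead_eq]; simp only [pvSub1]; split_ifs <;> first | rfl | (exfalso; omega)
  have p22 : pvARead board (i+2) (j+2)
      = if i+1 < board.length then (if j+1 < (board.getD 0 []).length then pvCell board (i+1) (j+1) else 0) else 0 := by
    rw [pvARead_eq]; simp only [pvSub1]; split_ifs <;> first | rfl | (exfalso; omega)
  rw [pvATemp, p11, p00, p10, p20, p01, p21, p02, p12, p22]
  unfold pvTriple
  split_ifs <;> ring

-- === B-side characterization: reading the horizontal table H ===
theorem pvH_read (board : List (List Int)) (a j : Nat) (ha : a < board.length)
    (hj : j < (board.getD 0 []).length) :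
    (((board.map (pvHRow (board.getD 0 []).length)).getD a []).getD j 0) = pvTriple board a j := by
  obtain ⟨row, hrow⟩ : ∃ row, board[a]? = some row :=
    Option.isSome_iff_exists.mp (by simp [ha])
  have hval : board.getD a [] = row := by simp [List.getD_eq_getElem?_getD, hrow]
  have hj' : j < (board[0]?.getD []).length := by
    simpa [List.getD_eq_getElem?_getD] using hj
  simp [List.getD_eq_getElem?_getD, List.getElem?_map, hrow, pvHRow,
    hj', pvTriple, pvCell]

-- the per-column predicates agree: A's temp = 0 iff Source B's condition holds
theorem pvCond_eq (board : List (List Int)) (i j : Nat)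
    (hi : i < board.length) (hj : j < (board.getD 0 []).length) :
    (pvATemp board i j = 0)
      ↔ (pvBCond (board.map (pvHRow (board.getD 0 []).length)) board.length i j = true) := by
  have hEq : ((if 0 < i then ((board.map (pvHRow (board.getD 0 []).length)).getD (i-1) []).getD j 0 else 0)
      + ((board.map (pvHRow (board.getD 0 []).length)).getD i []).getD j 0
      + (if i+1 < board.length then ((board.map (pvHRow (board.getD 0 []).length)).getD (i+1) []).getD j 0 else 0))
      = pvATemp board i j := by
    rw [pvTemp_eq board i j hi hj, pvH_read board i j hi hj]
    congr 1
    · congr 1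
      split_ifs with h
      · exact pvH_read board (i-1) j (by omega) hj
      · rfl
    · split_ifs with h
      · exact pvH_read board (i+1) j (by omega) hj
      · rfl
  unfold pvBCond
  rw [decide_eq_true_eq, hEq]

-- counting: A's inner if/accumulate loop = length of Source B's filtered column list
theorem pvInnerCount (board : List (List Int)) (i : Nat) (hi : i < board.length) :
    ∀ k, k ≤ (board.getD 0 []).length → ∀ a : Int,
      (List.range k).foldl (fun ans j => if pvATemp board i j = 0 then ans + 1 else ans) a
        = a + (((List.range k).filter
            (pvBCond (board.map (pvHRow (board.getD 0 []).length)) board.length i)).length : Int) := by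
  intro k
  induction k with
  | zero => intro _ a; simp
  | succ k ih =>
    intro hk a
    rw [pvFoldlRangeSucc, ih (by omega), List.range_succ, List.filter_append]
    by_cases h : pvATemp board i k = 0
    · have hb := (pvCond_eq board i k hi (by omega)).mp h
      have hfil : (List.filter (pvBCond (board.map (pvHRow (board.getD 0 []).length)) board.length i) [k]).length = 1 := by
        rw [List.filter_cons, if_pos hb]; rfl
      rw [if_pos h, List.length_append, hfil]
      push_cast
      ring
    · have hb : pvBCond (board.map (pvHRow (board.getD 0 []).length)) board.length i k = false := by
        rcases Bool.eq_false_or_eq_true (pvBCond (board.map (pvHRow (board.getD 0 []).length)) board.length i k) with h' | h'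
        · exact absurd ((pvCond_eq board i k hi (by omega)).mpr h') h
        · exact h'
      have hfil : (List.filter (pvBCond (board.map (pvHRow (board.getD 0 []).length)) board.length i) [k]).length = 0 := by
        rw [List.filter_cons, if_neg (by rw [hb]; exact Bool.false_ne_true)]; rfl
      rw [if_neg h, List.length_append, hfil]
      push_cast
      ring

-- counting: A's outer loop = the sum of Source B's per-row counts
theorem pvOuterCount (board : List (List Int)) :
    ∀ k, k ≤ board.length → ∀ a : Int,
      (List.range k).foldl (fun ans i =>
          (List.range (board.getD 0 []).length).foldl
            (fun ans j => if pvATemp board i j = 0 then ans + 1 else ans) ans) a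
        = a + ((((List.range k).map (fun i =>
            ((List.range (board.getD 0 []).length).filter
              (pvBCond (board.map (pvHRow (board.getD 0 []).length)) board.length i)).length)).sum : Nat) : Int) := by
  intro k
  induction k with
  | zero => intro _ a; simp
  | succ k ih =>
    intro hk a
    rw [pvFoldlRangeSucc, ih (by omega),
      pvInnerCount board k (by omega) (board.getD 0 []).length le_rfl,
      List.range_succ, List.map_append, List.sum_append,
      List.map_cons, List.map_nil, List.sum_cons, List.sum_nil]
    push_cast
    ring

-- ===== VERDICT (by name: the statement is the Claim_ definition above) =====
theorem solution_spec : Claim_equal_solution := by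
  intro board _ _
  unfold Spec_solution solution solution_alt
  rw [pvOuterCount board board.length le_rfl 0]
  simp
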